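-- pv_equiv track=rewrite | github.com/sarkisc/codefights | intervewPractice/prac.py | ballsRearranging
-- ===== SOURCE A (Python) =====
-- def ballsRearranging(balls):
--
--     def fix(num):
--         count = 0
--         start = num
--         zeroes = [0 for i in range(0,len(balls))]
--         for ball in balls:
--             i = 0
--             while i < len(balls):
--                 if (start+i) not in balls:
--                     zeroes[count] += 1
--
--                 i += 1
--
--             count += 1
--             start -= 1
--
--         return min(zeroes)
--
--     return min([fix(num) for num in balls])
-- ===== SOURCE B (Python) =====
-- def ballsRearranging(balls):
--     # Sort the distinct values once; the best length-n window can always start at a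
--     # present value (shift any window right to its least present element without
--     # losing coverage), so a single two-pointer sweep over the sorted distinct
--     # values finds the maximum coverage; answer = n - max coverage.
--     n = len(balls)
--     vs = sorted(set(balls))
--     best = 0
--     j = 0
--     for i, v in enumerate(vs):
--         while j < len(vs) and vs[j] < v + n:
--             j += 1
--         if j - i > best:
--             best = j - i
--     return n - best
-- ===== Notes on version B (the rewrite author's own statement) =====
-- stated objective: faster
-- what changed: A scans every ball x shift candidate start and tests each of the n window offsets by linear list membership (O(n^4)); B sorts the distinct values once and runs a single two-pointer sweep over them, using the fact that an optimal window can always start at a present value, so only the m distinct present values are tried (O(n log n)).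
-- outside the precondition, e.g. on ballsRearranging([]): A raises ValueError, B returns 0
import Mathlib
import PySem

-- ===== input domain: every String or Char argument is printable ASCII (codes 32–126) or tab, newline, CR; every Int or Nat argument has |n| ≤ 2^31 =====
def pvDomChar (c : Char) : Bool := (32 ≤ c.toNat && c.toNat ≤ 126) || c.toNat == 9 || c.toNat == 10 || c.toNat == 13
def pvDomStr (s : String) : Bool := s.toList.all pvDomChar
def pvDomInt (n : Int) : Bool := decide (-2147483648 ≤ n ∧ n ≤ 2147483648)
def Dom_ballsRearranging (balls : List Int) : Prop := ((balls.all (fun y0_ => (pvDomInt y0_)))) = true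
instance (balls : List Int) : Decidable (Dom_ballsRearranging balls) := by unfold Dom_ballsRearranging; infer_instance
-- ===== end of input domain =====

-- B replaces A's brute-force scan over all n^2 window starts (each with a linear list-membership
-- test per offset) by one sort of the distinct values followed by a single two-pointer sweep:
-- the best window can always start at a present value, so only those windows are examined.

-- ===== PORT A =====
def ballsRearranging (balls : List Int) : Int :=
  let fix : Int → Int := fun num =>
    -- zeroes = [0 for i in range(0,len(balls))]
    let zeroes := (List.range balls.length).map (fun _ => (0 : Int))
    -- for ball in balls: i = 0; while i < len(balls): if (start+i) not in balls: zeroes[count] += 1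
    let st := balls.foldl
      (fun (st : List Int × Nat × Int) _ball =>
        let z := (List.range balls.length).foldl
          (fun (z : List Int) (i : Nat) =>
            if (st.2.2 + (i : Int)) ∉ balls then z.set st.2.1 (z.getD st.2.1 0 + 1) else z)
          st.1
        (z, st.2.1 + 1, st.2.2 - 1))
      (zeroes, 0, num)
    -- return min(zeroes)  (ValueError on an empty sequence: excluded by Pre_)
    match PySem.List.min? st.1 (fun x => x) with
    | some m => m
    | none => 0
  match PySem.List.min? (balls.map (fun num => fix num)) (fun x => x) with
  | some m => m
  | none => 0

-- ===== PORT B =====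
-- while j < len(vs) and vs[j] < thr: j += 1
def pvAdv (vs : List Int) (thr : Int) (j : Nat) : Nat :=
  if h : j < vs.length then
    if vs[j] < thr then pvAdv vs thr (j + 1) else j
  else j
termination_by vs.length - j

def ballsRearranging_alt (balls : List Int) : Int :=
  let n : Int := balls.length
  -- vs = sorted(set(balls))
  let vs : List Int := PySem.List.sorted (PySem.Set.ofList balls) (fun x => x) false
  -- for i, v in enumerate(vs): advance j; best = max(best, j - i)
  let st := (PySem.List.enumerate vs).foldl
    (fun (st : Int × Nat) (p : Int × Int) =>
      let j := pvAdv vs (p.2 + n) st.2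
      (if (j : Int) - p.1 > st.1 then (j : Int) - p.1 else st.1, j))
    (0, 0)
  n - st.1

-- ===== PRECONDITION & SPEC =====
-- Pre_ excludes only the empty list, on which A raises ValueError (min() of an empty sequence).
def Pre_ballsRearranging (balls : List Int) : Prop := balls ≠ []
instance (balls : List Int) : Decidable (Pre_ballsRearranging balls) := by unfold Pre_ballsRearranging; infer_instance
def pvWitness_ballsRearranging : List Int := ([1, 5, 2])

def Spec_ballsRearranging (balls : List Int) (out : Int) : Prop := out = ballsRearranging_alt balls
instance (balls : List Int) (out : Int) : Decidable (Spec_ballsRearranging balls out) := by unfold Spec_ballsRearranging; infer_instance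

-- ===== CLAIM (what is proved, stated in full; the proofs are below) =====
def Claim_equal_ballsRearranging : Prop := ∀ (balls : List Int), Dom_ballsRearranging balls → Pre_ballsRearranging balls → Spec_ballsRearranging balls (ballsRearranging balls)

-- ===== LEMMAS AND PROOFS =====

-- number of offsets i < len(balls) with start+i missing from balls (A's zeroes[count])
def missCount (balls : List Int) (s : Int) : Int :=
  ((List.range balls.length).countP (fun (i : Nat) => !decide ((s + (i : Int)) ∈ balls)) : Int)

-- the sorted distinct values B works on
def vsOf (balls : List Int) : List Int :=
  PySem.List.sorted (PySem.Set.ofList balls) (fun x => x) false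

-- number of elements of vs strictly below thr (what the two-pointer j converges to)
def cnt (vs : List Int) (thr : Int) : Nat := vs.countP (fun u => decide (u < thr))

-- window coverage: distinct present values in [s, s+n)
def covS (balls : List Int) (s : Int) : Nat :=
  (vsOf balls).countP (fun u => decide (s ≤ u ∧ u < s + (balls.length : Int)))

-- ===== A-side lemmas (loop → missCount table) =====

theorem getD_set_self (z : List Int) (i : Nat) (v : Int) (h : i < z.length) :
    (z.set i v).getD i 0 = v := by simp [List.getD, h]

theorem getD_set_ne (z : List Int) (i j : Nat) (v : Int) (h : i ≠ j) :
    (z.set i v).getD j 0 = z.getD j 0 := by simp [List.getD, h]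

theorem set_getD_self (z : List Int) (i : Nat) : z.set i (z.getD i 0) = z := by
  by_cases h : i < z.length
  · apply List.ext_getElem (by simp)
    intro j h1 h2
    rw [List.getElem_set]
    split
    · rename_i hij; subst hij; simp [List.getD, List.getElem?_eq_getElem h]
    · rfl
  · exact List.set_eq_of_length_le (by omega)

theorem inner_fold (balls : List Int) (l : List Nat) (start : Int) (count : Nat) (z : List Int) :
    l.foldl (fun (z : List Int) (i : Nat) => if (start + (i : Int)) ∉ balls then z.set count (z.getD count 0 + 1) else z) z
      = z.set count (z.getD count 0 + (l.countP (fun (i : Nat) => !decide ((start + (i : Int)) ∈ balls)) : Int)) := by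
  induction l generalizing z with
  | nil =>
    simp only [List.foldl_nil, List.countP_nil, Nat.cast_zero, add_zero]
    exact (set_getD_self z count).symm
  | cons x t ih =>
    simp only [List.foldl_cons, List.countP_cons]
    by_cases hx : (start + (x : Int)) ∈ balls
    · rw [if_neg (by simpa using hx), ih]
      simp [hx]
    · rw [if_pos hx, ih]
      by_cases h : count < z.length
      · rw [List.set_set, getD_set_self z count _ h]
        congr 1
        simp [hx]
        omega
      · have hle : z.length ≤ count := by omega
        simp [List.set_eq_of_length_le hle]

-- the sequence of slot writes A's outer for-loop performs
def wr (balls : List Int) : List Int → List Int → Nat → Int → List Int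
  | [], z, _, _ => z
  | _ :: t, z, count, start =>
      wr balls t (z.set count (z.getD count 0 + missCount balls start)) (count + 1) (start - 1)

theorem foldA_eq_wr (balls : List Int) (l : List Int) (z : List Int) (count : Nat) (start : Int) :
    (l.foldl
      (fun (st : List Int × Nat × Int) _ball =>
        let z := (List.range balls.length).foldl
          (fun (z : List Int) (i : Nat) =>
            if (st.2.2 + (i : Int)) ∉ balls then z.set st.2.1 (z.getD st.2.1 0 + 1) else z)
          st.1
        (z, st.2.1 + 1, st.2.2 - 1))
      (z, count, start)).1 = wr balls l z count start := by
  induction l generalizing z count start with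
  | nil => simp [wr]
  | cons x t ih =>
    simp only [List.foldl_cons, wr]
    rw [inner_fold]
    exact ih _ _ _

theorem wr_getD (balls : List Int) (l : List Int) (z : List Int) (count : Nat) (start : Int)
    (k : Nat) (hz0 : ∀ j, count ≤ j → z.getD j 0 = 0) :
    (wr balls l z count start).getD k 0
      = if count ≤ k ∧ k < count + l.length ∧ k < z.length
        then missCount balls (start - ((k - count : Nat) : Int))
        else z.getD k 0 := by
  induction l generalizing z count start with
  | nil =>
    rw [wr]
    simp only [List.length_nil, Nat.add_zero]
    rw [if_neg (by omega)]
  | cons x t ih =>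
    rw [wr, ih]
    · simp only [List.length_set, List.length_cons]
      by_cases hk : count + 1 ≤ k ∧ k < count + 1 + t.length ∧ k < z.length
      · rw [if_pos hk, if_pos (by omega)]
        have harg : start - 1 - ((k - (count + 1) : Nat) : Int) = start - ((k - count : Nat) : Int) := by
          omega
        rw [harg]
      · rw [if_neg hk]
        by_cases hkc : k = count
        · subst hkc
          by_cases hzl : k < z.length
          · rw [getD_set_self _ _ _ hzl, if_pos (by omega), hz0 k le_rfl]
            simp
          · rw [if_neg (by omega)]
            rw [List.set_eq_of_length_le (by omega)]
        · rw [getD_set_ne _ _ _ _ (fun h => hkc h.symm), if_neg (by omega)]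
    · intro j hj
      rw [getD_set_ne _ _ _ _ (by omega)]
      exact hz0 j (by omega)

theorem wr_length (balls : List Int) (l : List Int) (z : List Int) (count : Nat) (start : Int) :
    (wr balls l z count start).length = z.length := by
  induction l generalizing z count start with
  | nil => rfl
  | cons x t ih => simp [wr, ih]

theorem zeroes_getD (n j : Nat) : ((List.range n).map (fun _ => (0 : Int))).getD j 0 = 0 := by
  simp [List.getD]

theorem wr_eq_map (balls : List Int) (num : Int) :
    wr balls balls ((List.range balls.length).map (fun _ => (0 : Int))) 0 num
      = (List.range balls.length).map (fun (j : Nat) => missCount balls (num - (j : Int))) := by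
  apply List.ext_getElem (by simp [wr_length])
  intro k h1 h2
  have hlen : k < balls.length := by simpa [wr_length] using h1
  rw [← List.getD_eq_getElem _ 0 h1, ← List.getD_eq_getElem _ 0 h2]
  rw [wr_getD balls balls _ 0 num k (fun j _ => zeroes_getD _ j)]
  rw [if_pos (by simp; omega)]
  simp [List.getD, List.getElem?_map, List.getElem?_range hlen]

theorem fix_eq (balls : List Int) (num : Int) :
    (let zeroes := (List.range balls.length).map (fun _ => (0 : Int))
     let st := balls.foldl
      (fun (st : List Int × Nat × Int) _ball =>
        let z := (List.range balls.length).foldl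
          (fun (z : List Int) (i : Nat) =>
            if (st.2.2 + (i : Int)) ∉ balls then z.set st.2.1 (z.getD st.2.1 0 + 1) else z)
          st.1
        (z, st.2.1 + 1, st.2.2 - 1))
      (zeroes, 0, num)
     match PySem.List.min? st.1 (fun x => x) with
     | some m => m
     | none => 0)
    = match PySem.List.min? ((List.range balls.length).map (fun (j : Nat) => missCount balls (num - (j : Int)))) (fun x => x) with
      | some m => m
      | none => 0 := by
  simp only []
  rw [foldA_eq_wr, wr_eq_map]

-- min over A's inner list, as a value (proof-side helper)
def fixv (balls : List Int) (b : Int) : Int :=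
  match PySem.List.min? ((List.range balls.length).map (fun (j : Nat) => missCount balls (b - (j : Int)))) (fun x => x) with
  | some m => m
  | none => 0

theorem A_eq (balls : List Int) : ballsRearranging balls =
    match PySem.List.min? (balls.map (fun b => fixv balls b)) (fun x => x) with
    | some m => m
    | none => 0 := by
  unfold ballsRearranging
  simp only []
  rw [List.map_congr_left (fun num _ => fix_eq balls num)]
  rfl

theorem fixv_min (balls : List Int) (hne : balls ≠ []) (b : Int) :
    PySem.List.min? ((List.range balls.length).map (fun (j : Nat) => missCount balls (b - (j : Int)))) (fun x => x)
      = some (fixv balls b) := by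
  unfold fixv
  cases h : PySem.List.min? ((List.range balls.length).map (fun (j : Nat) => missCount balls (b - (j : Int)))) (fun x => x) with
  | none =>
    exfalso
    have := (PySem.List.min?_eq_none_iff _ _).mp h
    simp [List.map_eq_nil_iff, List.range_eq_nil, List.length_eq_zero_iff] at this
    exact hne this
  | some m => rfl

-- ===== B-side lemmas =====

theorem vsOf_pairwise_lt (balls : List Int) : (vsOf balls).Pairwise (· < ·) :=
  PySem.List.sorted_ofList_pairwise_lt balls

theorem mem_vsOf (balls : List Int) (x : Int) : x ∈ vsOf balls ↔ x ∈ balls := by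
  unfold vsOf
  rw [PySem.List.mem_sorted, PySem.Set.mem_ofList]

theorem cnt_le_length (vs : List Int) (thr : Int) : cnt vs thr ≤ vs.length :=
  List.countP_le_length

theorem cnt_mono (vs : List Int) (t1 t2 : Int) (h : t1 ≤ t2) : cnt vs t1 ≤ cnt vs t2 := by
  unfold cnt
  apply List.countP_mono_left
  intro a _ ha
  simp only [decide_eq_true_eq] at *
  omega

-- j converges to cnt vs thr on a sorted list
theorem pvAdv_eq (vs : List Int) (hs : vs.Pairwise (· ≤ ·)) (thr : Int) :
    ∀ j, j ≤ cnt vs thr → pvAdv vs thr j = cnt vs thr := by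
  have hsg := List.pairwise_iff_getElem.mp hs
  have key : ∀ d j, vs.length - j ≤ d → j ≤ cnt vs thr → pvAdv vs thr j = cnt vs thr := by
    intro d
    induction d with
    | zero =>
      intro j hd hj
      have hjl : vs.length ≤ j := by omega
      rw [pvAdv, dif_neg (by omega)]
      have := cnt_le_length vs thr
      omega
    | succ d ih =>
      intro j hd hj
      rw [pvAdv]
      by_cases hjl : j < vs.length
      · rw [dif_pos hjl]
        by_cases hv : vs[j] < thr
        · rw [if_pos hv]
          apply ih
          · omega
          · -- prefix of length j+1 all < thr
            have hall : ∀ a ∈ vs.take (j + 1), (fun u => decide (u < thr)) a = true := by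
              intro a ha
              rw [List.mem_take_iff_getElem] at ha
              obtain ⟨k, hk, hak⟩ := ha
              have hk' : k < vs.length := by omega
              have : vs[k] ≤ vs[j] := by
                rcases Nat.lt_or_ge k j with h | h
                · exact hsg k j (by omega) hjl h
                · have : k = j := by omega
                  subst this; rfl
              simp only [decide_eq_true_eq]
              rw [← hak]
              omega
            have hsplit : cnt vs thr
                = (vs.take (j + 1)).countP (fun u => decide (u < thr))
                  + (vs.drop (j + 1)).countP (fun u => decide (u < thr)) := by
              unfold cnt
              rw [← List.countP_append, List.take_append_drop]
            rw [List.countP_eq_length.mpr hall] at hsplit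
            have : (vs.take (j + 1)).length = j + 1 := by
              rw [List.length_take]; omega
            omega
        · rw [if_neg hv]
          -- suffix from j is all ≥ thr
          have hz : (vs.drop j).countP (fun u => decide (u < thr)) = 0 := by
            rw [List.countP_eq_zero]
            intro a ha
            rw [List.mem_drop_iff_getElem] at ha
            obtain ⟨k, hk, hak⟩ := ha
            have : vs[j] ≤ vs[j + k] := by
              rcases Nat.eq_zero_or_pos k with h0 | h0
              · subst h0; simp
              · exact hsg j (j + k) (by omega) (by omega) (by omega)
            simp only [decide_eq_true_eq]
            rw [← hak]
            omega
          have hsplit : cnt vs thr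
              = (vs.take j).countP (fun u => decide (u < thr))
                + (vs.drop j).countP (fun u => decide (u < thr)) := by
            unfold cnt
            rw [← List.countP_append, List.take_append_drop]
          have hle := List.countP_le_length (l := vs.take j) (p := fun u => decide (u < thr))
          have : (vs.take j).length ≤ j := by rw [List.length_take]; omega
          omega
      · rw [dif_neg hjl]
        have := cnt_le_length vs thr
        omega
  intro j hj
  exact key (vs.length - j) j le_rfl hj

-- count below v+n splits into count below v plus the window count
theorem cnt_split (vs : List Int) (v n : Int) (hn : 0 ≤ n) :
    cnt vs (v + n) = cnt vs v + vs.countP (fun u => decide (v ≤ u ∧ u < v + n)) := by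
  unfold cnt
  induction vs with
  | nil => simp
  | cons x t ih =>
    simp only [List.countP_cons, ih, decide_eq_true_eq]
    split_ifs <;> simp_all <;> omega

-- on a strictly sorted list, the index of an element counts the elements below it
theorem cnt_at_index (vs : List Int) (hs : vs.Pairwise (· < ·)) (i : Nat) (hi : i < vs.length) :
    cnt vs (vs[i]) = i := by
  have hsg := List.pairwise_iff_getElem.mp hs
  have hsplit : cnt vs (vs[i])
      = (vs.take i).countP (fun u => decide (u < vs[i]))
        + (vs.drop i).countP (fun u => decide (u < vs[i])) := by
    unfold cnt
    rw [← List.countP_append, List.take_append_drop]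
  have h1 : (vs.take i).countP (fun u => decide (u < vs[i])) = (vs.take i).length := by
    rw [List.countP_eq_length]
    intro a ha
    rw [List.mem_take_iff_getElem] at ha
    obtain ⟨k, hk, hak⟩ := ha
    simp only [decide_eq_true_eq]
    rw [← hak]
    exact hsg k i (by omega) hi (by omega)
  have h2 : (vs.drop i).countP (fun u => decide (u < vs[i])) = 0 := by
    rw [List.countP_eq_zero]
    intro a ha
    rw [List.mem_drop_iff_getElem] at ha
    obtain ⟨k, hk, hak⟩ := ha
    have : vs[i] ≤ vs[i + k] := by
      rcases Nat.eq_zero_or_pos k with h0 | h0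
      · subst h0; simp
      · exact le_of_lt (hsg i (i + k) (by omega) (by omega) (by omega))
    simp only [decide_eq_true_eq]
    rw [← hak]
    omega
  have h3 : (vs.take i).length = i := by rw [List.length_take]; omega
  omega

-- per-index coverage: cnt(vs[i]+n) - i = covS at vs[i]
theorem cov_at_index (balls : List Int) (i : Nat) (hi : i < (vsOf balls).length) :
    (cnt (vsOf balls) ((vsOf balls)[i] + (balls.length : Int)) : Int) - i
      = (covS balls ((vsOf balls)[i]) : Int) := by
  have h := cnt_split (vsOf balls) ((vsOf balls)[i]) (balls.length : Int) (by positivity)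
  have h2 := cnt_at_index (vsOf balls) (vsOf_pairwise_lt balls) i hi
  unfold covS
  omega

-- the spec-side running maximum B's loop computes
def bestFrom (vs : List Int) (n : Int) (i : Nat) (b : Int) : Int :=
  if h : i < vs.length then
    bestFrom vs n (i + 1) (max b ((cnt vs (vs[i] + n) : Int) - i))
  else b
termination_by vs.length - i

theorem le_bestFrom (vs : List Int) (n : Int) :
    ∀ d i b, vs.length - i ≤ d → b ≤ bestFrom vs n i b := by
  intro d
  induction d with
  | zero =>
    intro i b hd
    rw [bestFrom, dif_neg (by omega)]
  | succ d ih =>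
    intro i b hd
    rw [bestFrom]
    by_cases h : i < vs.length
    · rw [dif_pos h]
      exact le_trans (le_max_left _ _) (ih (i + 1) _ (by omega))
    · rw [dif_neg h]

theorem bestFrom_ge (vs : List Int) (n : Int) :
    ∀ d i b k (hk : k < vs.length), vs.length - i ≤ d → i ≤ k →
      (cnt vs (vs[k] + n) : Int) - k ≤ bestFrom vs n i b := by
  intro d
  induction d with
  | zero => intro i b k hk hd hik; omega
  | succ d ih =>
    intro i b k hk hd hik
    rw [bestFrom, dif_pos (by omega)]
    by_cases hek : i = k
    · subst hek
      exact le_trans (le_max_right _ _) (le_bestFrom vs n (vs.length - (i + 1)) (i + 1) _ le_rfl)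
    · exact ih (i + 1) _ k hk (by omega) (by omega)

theorem bestFrom_cases (vs : List Int) (n : Int) :
    ∀ d i b, vs.length - i ≤ d →
      bestFrom vs n i b = b ∨
        ∃ k, i ≤ k ∧ ∃ hk : k < vs.length, bestFrom vs n i b = (cnt vs (vs[k] + n) : Int) - k := by
  intro d
  induction d with
  | zero =>
    intro i b hd
    left
    rw [bestFrom, dif_neg (by omega)]
  | succ d ih =>
    intro i b hd
    by_cases h : i < vs.length
    · rw [bestFrom, dif_pos h]
      rcases ih (i + 1) (max b ((cnt vs (vs[i] + n) : Int) - i)) (by omega) with hc | ⟨k, hik, hk, hc⟩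
      · rw [hc]
        rcases max_choice b ((cnt vs (vs[i] + n) : Int) - i) with hm | hm
        · left; exact hm
        · right; exact ⟨i, le_rfl, h, hm⟩
      · right; exact ⟨k, by omega, hk, hc⟩
    · left
      rw [bestFrom, dif_neg h]

-- B's fold is bestFrom (the two-pointer j stays equal to cnt of the current threshold)
theorem fold_eq_bestFrom (balls : List Int) :
    ∀ d (i : Nat) (b : Int) (j : Nat), (vsOf balls).length - i ≤ d →
      (∀ h : i < (vsOf balls).length, j ≤ cnt (vsOf balls) ((vsOf balls)[i] + (balls.length : Int))) →
      ((PySem.List.enumerate ((vsOf balls).drop i) (i : Int)).foldl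
        (fun (st : Int × Nat) (p : Int × Int) =>
          let j := pvAdv (vsOf balls) (p.2 + (balls.length : Int)) st.2
          (if (j : Int) - p.1 > st.1 then (j : Int) - p.1 else st.1, j))
        (b, j)).1 = bestFrom (vsOf balls) (balls.length : Int) i b := by
  intro d
  induction d with
  | zero =>
    intro i b j hd hj
    have hge : (vsOf balls).length ≤ i := by omega
    rw [List.drop_of_length_le hge, PySem.List.enumerate_nil, List.foldl_nil,
        bestFrom, dif_neg (by omega)]
  | succ d ih =>
    intro i b j hd hj
    by_cases h : i < (vsOf balls).length
    · rw [List.drop_eq_getElem_cons h, PySem.List.enumerate_cons, List.foldl_cons]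
      simp only []
      have hple : (vsOf balls).Pairwise (· ≤ ·) :=
        (vsOf_pairwise_lt balls).imp le_of_lt
      rw [pvAdv_eq (vsOf balls) hple _ j (hj h)]
      have hmax : (if (cnt (vsOf balls) ((vsOf balls)[i] + (balls.length : Int)) : Int) - (i : Int) > b
            then (cnt (vsOf balls) ((vsOf balls)[i] + (balls.length : Int)) : Int) - (i : Int) else b)
          = max b ((cnt (vsOf balls) ((vsOf balls)[i] + (balls.length : Int)) : Int) - (i : Int)) := by
        rcases max_choice b ((cnt (vsOf balls) ((vsOf balls)[i] + (balls.length : Int)) : Int) - (i : Int)) with hm | hm <;>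
          rw [hm] <;> split_ifs <;> omega
      have hcast : (i : Int) + 1 = ((i + 1 : Nat) : Int) := by push_cast; ring
      rw [hmax, hcast, ih (i + 1) _ _ (by omega)]
      · conv_rhs => rw [bestFrom]
        rw [dif_pos h]
      · intro h1
        have hle : (vsOf balls)[i] ≤ (vsOf balls)[i + 1] :=
          (List.pairwise_iff_getElem.mp hple) i (i + 1) (by omega) h1 (by omega)
        exact le_trans le_rfl (cnt_mono _ _ _ (by omega))
    · rw [List.drop_of_length_le (by omega), PySem.List.enumerate_nil, List.foldl_nil,
          bestFrom, dif_neg h]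

theorem B_eq (balls : List Int) :
    ballsRearranging_alt balls
      = (balls.length : Int) - bestFrom (vsOf balls) (balls.length : Int) 0 0 := by
  unfold ballsRearranging_alt
  simp only []
  have h := fold_eq_bestFrom balls (vsOf balls).length 0 0 0 (by omega)
    (fun _ => Nat.zero_le _)
  simp only [List.drop_zero, Nat.cast_zero] at h
  exact congrArg (fun x => (balls.length : Int) - x) h

-- missCount is the window complement of the coverage
theorem missCount_eq (balls : List Int) (s : Int) :
    missCount balls s = (balls.length : Int) - (covS balls s : Int) := by
  unfold missCount covS
  have hsum := List.length_eq_countP_add_countP (fun (i : Nat) => decide ((s + (i : Int)) ∈ balls)) (l := List.range balls.length)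
  simp only [List.length_range, decide_not, Bool.decide_eq_true] at hsum
  -- present-count over the window equals the distinct-value count
  have hpres : (List.range balls.length).countP (fun (i : Nat) => decide ((s + (i : Int)) ∈ balls))
      = (vsOf balls).countP (fun u => decide (s ≤ u ∧ u < s + (balls.length : Int))) := by
    have hmap : (List.range balls.length).countP (fun (i : Nat) => decide ((s + (i : Int)) ∈ balls))
        = ((List.range balls.length).map (fun (i : Nat) => s + (i : Int))).countP (fun v => decide (v ∈ balls)) := by
      rw [List.countP_map]
      rfl
    rw [hmap]
    rw [List.countP_eq_length_filter, List.countP_eq_length_filter]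
    have hnd1 : (((List.range balls.length).map (fun (i : Nat) => s + (i : Int))).filter (fun v => decide (v ∈ balls))).Nodup := by
      apply List.Nodup.filter
      apply List.Nodup.map
      · intro a b hab
        have hab' : s + (a : Int) = s + (b : Int) := hab
        omega
      · exact List.nodup_range
    have hnd2 : ((vsOf balls).filter (fun u => decide (s ≤ u ∧ u < s + (balls.length : Int)))).Nodup := by
      apply List.Nodup.filter
      exact ((vsOf_pairwise_lt balls).imp (fun h => ne_of_lt h))
    apply List.Perm.length_eq
    rw [List.perm_ext_iff_of_nodup hnd1 hnd2]
    intro x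
    simp only [List.mem_filter, List.mem_map, List.mem_range, decide_eq_true_eq, mem_vsOf]
    constructor
    · rintro ⟨⟨i, hi, rfl⟩, hmem⟩
      exact ⟨hmem, by omega, by omega⟩
    · rintro ⟨hmem, h1, h2⟩
      refine ⟨⟨(x - s).toNat, by omega, by omega⟩, hmem⟩
  omega

-- shift lemma: any window's coverage is matched by a window starting at a present value
theorem shift_cov (balls : List Int) (s : Int)
    (hw : (vsOf balls).filter (fun u => decide (s ≤ u ∧ u < s + (balls.length : Int))) ≠ []) :
    ∃ k, ∃ hk : k < (vsOf balls).length, covS balls s ≤ covS balls ((vsOf balls)[k]) := by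
  set n : Int := (balls.length : Int) with hn
  cases hwc : (vsOf balls).filter (fun u => decide (s ≤ u ∧ u < s + n)) with
  | nil => exact absurd hwc hw
  | cons v t =>
    have hvmem : v ∈ vsOf balls := List.mem_of_mem_filter (by rw [hwc]; exact List.mem_cons_self)
    have hvwin : s ≤ v ∧ v < s + n := by
      have := List.of_mem_filter (p := fun u => decide (s ≤ u ∧ u < s + n)) (a := v)
        (by rw [hwc]; exact List.mem_cons_self)
      simpa using this
    obtain ⟨k, hk, hvk⟩ := List.getElem_of_mem hvmem
    refine ⟨k, hk, ?_⟩
    rw [hvk]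
    unfold covS
    rw [← hn]
    apply List.countP_mono_left
    intro u hu hus
    simp only [decide_eq_true_eq] at *
    -- u is in the window of s, hence in the filtered list, hence ≥ its head v
    have humem : u ∈ (vsOf balls).filter (fun u => decide (s ≤ u ∧ u < s + n)) := by
      rw [List.mem_filter]
      exact ⟨hu, by simpa using hus⟩
    rw [hwc] at humem
    have hsorted : (v :: t).Pairwise ((· ≤ ·) : Int → Int → Prop) := by
      rw [← hwc]
      exact ((vsOf_pairwise_lt balls).imp le_of_lt).filter _
    have hvu : v ≤ u := by
      rcases List.mem_cons.mp humem with h | h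
      · omega
      · exact List.rel_of_pairwise_cons hsorted h
    omega

-- ===== VERDICT (by name: the statement is the Claim_ definition above) =====
theorem ballsRearranging_spec : Claim_equal_ballsRearranging := by
  intro balls hdom hne
  unfold Spec_ballsRearranging
  rw [A_eq, B_eq]
  have hn : 0 < balls.length := List.length_pos_iff.mpr hne
  cases hA : PySem.List.min? (balls.map (fun b => fixv balls b)) (fun x => x) with
  | none =>
    exfalso
    have := (PySem.List.min?_eq_none_iff _ _).mp hA
    simp [List.map_eq_nil_iff] at this
    exact hne this
  | some mA =>
  simp only []
  have hAmem := PySem.List.min?_mem hA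
  have hAlb := PySem.List.min?_isMin hA
  have hbest0 : (0 : Int) ≤ bestFrom (vsOf balls) (balls.length : Int) 0 0 :=
    le_bestFrom _ _ (vsOf balls).length 0 0 (by omega)
  -- fixv b ≤ missCount balls b (offset j = 0 is in the inner minimum)
  have hfix_le : ∀ b ∈ balls, fixv balls b ≤ missCount balls b := by
    intro b hb
    have hmem0 : missCount balls b
        ∈ (List.range balls.length).map (fun (j : Nat) => missCount balls (b - (j : Int))) := by
      refine List.mem_map.mpr ⟨0, List.mem_range.mpr hn, by simp⟩
    exact PySem.List.min?_isMin (fixv_min balls hne b) _ hmem0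
  apply le_antisymm
  · -- mA ≤ n - best
    rcases bestFrom_cases (vsOf balls) (balls.length : Int) (vsOf balls).length 0 0 (by omega)
      with hc | ⟨k, _, hk, hc⟩
    · -- best = 0; mA = missCount(...) ≤ n
      obtain ⟨b0, hb0, hmA⟩ := List.mem_map.mp hAmem
      have h0 := PySem.List.min?_mem (fixv_min balls hne b0)
      obtain ⟨j0, hj0, hval⟩ := List.mem_map.mp h0
      have hcov := missCount_eq balls (b0 - (j0 : Int))
      have hcnn : (0 : Int) ≤ (covS balls (b0 - (j0 : Int)) : Int) := Int.natCast_nonneg _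
      omega
    · -- best = covS (vsOf balls)[k], a present value
      have hcov := cov_at_index balls k hk
      have hmemb : (vsOf balls)[k] ∈ balls := (mem_vsOf balls _).mp (List.getElem_mem hk)
      have h1 : mA ≤ fixv balls ((vsOf balls)[k]) :=
        hAlb _ (List.mem_map.mpr ⟨_, hmemb, rfl⟩)
      have h2 := hfix_le _ hmemb
      have h3 := missCount_eq balls ((vsOf balls)[k])
      omega
  · -- n - best ≤ mA
    obtain ⟨b0, hb0, hmA⟩ := List.mem_map.mp hAmem
    have h0 := PySem.List.min?_mem (fixv_min balls hne b0)
    obtain ⟨j0, hj0, hval⟩ := List.mem_map.mp h0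
    have hmiss := missCount_eq balls (b0 - (j0 : Int))
    have hcovle : (covS balls (b0 - (j0 : Int)) : Int)
        ≤ bestFrom (vsOf balls) (balls.length : Int) 0 0 := by
      by_cases hflt : (vsOf balls).filter
          (fun u => decide ((b0 - (j0 : Int)) ≤ u ∧ u < (b0 - (j0 : Int)) + (balls.length : Int))) = []
      · have hz : covS balls (b0 - (j0 : Int)) = 0 := by
          unfold covS
          rw [List.countP_eq_length_filter, hflt]
          rfl
        rw [hz]
        exact_mod_cast hbest0
      · obtain ⟨k, hk, hle⟩ := shift_cov balls (b0 - (j0 : Int)) hflt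
        have hcov := cov_at_index balls k hk
        have hge := bestFrom_ge (vsOf balls) (balls.length : Int) (vsOf balls).length 0 0 k hk
          (by omega) (by omega)
        omega
    omega
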